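-- pv_equiv track=rewrite | github.com/hauteuar/research_agent | agents/code_parser_agent_simple.py | _find_section_enhanced
-- ===== SOURCE A (Python) =====
-- def _find_section_enhanced(content: str, position: int) -> str:
--     """Enhanced section detection"""
--     before_content = content[:position].upper()
--
--     # Look for the most recent section header
--     sections = [
--         ('WORKING-STORAGE SECTION', 'WORKING-STORAGE'),
--         ('FILE SECTION', 'FILE-SECTION'),
--         ('LINKAGE SECTION', 'LINKAGE'),
--         ('PROCEDURE DIVISION', 'PROCEDURE'),
--         ('ENVIRONMENT DIVISION', 'ENVIRONMENT'),
--         ('DATA DIVISION', 'DATA'),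
--         ('IDENTIFICATION DIVISION', 'IDENTIFICATION')
--     ]
--
--     current_section = 'UNKNOWN'
--     last_position = -1
--
--     for section_text, section_name in sections:
--         pos = before_content.rfind(section_text)
--         if pos > last_position:
--             last_position = pos
--             current_section = section_name
--
--     return current_section
-- ===== SOURCE B (Python) =====
-- def _find_section_enhanced(content: str, position: int) -> str:
--     """Enhanced section detection: one backward scan, first header starting at the
--     latest position wins (headers tried in list order at each position)."""
--     text = content[:position].upper()
--     headers = [
--         ('WORKING-STORAGE SECTION', 'WORKING-STORAGE'),
--         ('FILE SECTION', 'FILE-SECTION'),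
--         ('LINKAGE SECTION', 'LINKAGE'),
--         ('PROCEDURE DIVISION', 'PROCEDURE'),
--         ('ENVIRONMENT DIVISION', 'ENVIRONMENT'),
--         ('DATA DIVISION', 'DATA'),
--         ('IDENTIFICATION DIVISION', 'IDENTIFICATION'),
--     ]
--     for i in range(len(text) - 1, -1, -1):
--         for header, name in headers:
--             if text.startswith(header, i):
--                 return name
--     return 'UNKNOWN'
-- ===== Notes on version B (the rewrite author's own statement) =====
-- stated objective: alternative
-- what changed: Replaces seven independent rfind scans with manual max/name tracking by a single backward position scan over the uppercased prefix that returns the first header matching at the latest position.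
import Mathlib
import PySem

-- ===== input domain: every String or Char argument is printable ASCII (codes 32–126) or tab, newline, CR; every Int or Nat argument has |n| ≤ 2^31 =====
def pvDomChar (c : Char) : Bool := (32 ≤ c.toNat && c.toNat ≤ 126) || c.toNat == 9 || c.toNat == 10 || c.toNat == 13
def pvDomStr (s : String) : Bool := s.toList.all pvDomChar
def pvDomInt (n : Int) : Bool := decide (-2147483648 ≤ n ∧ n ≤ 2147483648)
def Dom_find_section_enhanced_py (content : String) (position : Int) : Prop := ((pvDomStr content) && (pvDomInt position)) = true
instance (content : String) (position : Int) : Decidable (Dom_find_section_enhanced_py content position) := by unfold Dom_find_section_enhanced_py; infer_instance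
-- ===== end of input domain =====

-- B replaces A's seven rfind scans + max tracking by one backward position scan; alternative algorithm, same result.

-- the sections table shared by both Pythons (same literal list in Source A and Source B)
def pvSections : List (String × String) :=
  [("WORKING-STORAGE SECTION", "WORKING-STORAGE"),
   ("FILE SECTION", "FILE-SECTION"),
   ("LINKAGE SECTION", "LINKAGE"),
   ("PROCEDURE DIVISION", "PROCEDURE"),
   ("ENVIRONMENT DIVISION", "ENVIRONMENT"),
   ("DATA DIVISION", "DATA"),
   ("IDENTIFICATION DIVISION", "IDENTIFICATION")]

-- ===== PORT A =====
-- content[:position].upper() ; then fold over the sections tracking (last_position, current_section)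
def find_section_enhanced_py (content : String) (position : Int) : String :=
  let before := PySem.Chars.upper (PySem.List.slice content.toList none (some position))
  (pvSections.foldl
    (fun (st : Int × String) hn =>
      let pos := PySem.Chars.rfind before hn.1.toList
      if st.1 < pos then (pos, hn.2) else st)
    (-1, "UNKNOWN")).2

-- ===== PORT B =====
-- for i in range(len(text)-1, -1, -1): first header with text.startswith(header, i) wins
-- pvScan text hs (i+1) examines positions i, i-1, …, 0; text.startswith(header, i) is
-- PySem.Chars.startswith (text.drop i) header (exact for 0 ≤ i ≤ len(text))
def pvScan (t : List Char) (hs : List (String × String)) : Nat → String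
  | 0 => "UNKNOWN"
  | i + 1 =>
    match hs.find? (fun hn => PySem.Chars.startswith (t.drop i) hn.1.toList) with
    | some hn => hn.2
    | none => pvScan t hs i

def find_section_enhanced_py_alt (content : String) (position : Int) : String :=
  let text := PySem.Chars.upper (PySem.List.slice content.toList none (some position))
  pvScan text pvSections text.length

-- ===== PRECONDITION & SPEC =====
def Spec_find_section_enhanced_py (content : String) (position : Int) (out : String) : Prop := out = find_section_enhanced_py_alt content position
instance (content : String) (position : Int) (out : String) : Decidable (Spec_find_section_enhanced_py content position out) := by unfold Spec_find_section_enhanced_py; infer_instance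

-- ===== CLAIM (what is proved, stated in full; the proofs are below) =====
def Claim_equal_find_section_enhanced_py : Prop := ∀ (content : String) (position : Int), Dom_find_section_enhanced_py content position → Spec_find_section_enhanced_py content position (find_section_enhanced_py content position)

-- ===== LEMMAS AND PROOFS =====

-- A's fold over the sections, with each rfind truncated to candidate positions ≤ b
def pvFoldB (t : List Char) (b : Nat) (hs : List (String × String)) (st : Int × String) : Int × String :=
  hs.foldl
    (fun (st : Int × String) hn =>
      let pos := PySem.Chars.rfind.go t hn.1.toList b
      if st.1 < pos then (pos, hn.2) else st) st

theorem pvGo_le (t h : List Char) (b : Nat) : PySem.Chars.rfind.go t h b ≤ (b : Int) := by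
  induction b with
  | zero => simp [PySem.Chars.rfind.go]; split <;> simp
  | succ j ih =>
    simp only [PySem.Chars.rfind.go]
    split
    · simp
    · exact le_trans ih (by exact_mod_cast Nat.le_succ j)

theorem pvGo_of_match (t h : List Char) (b : Nat) (hm : h.isPrefixOf (t.drop b) = true) :
    PySem.Chars.rfind.go t h b = (b : Int) := by
  cases b with
  | zero => simp at hm; simp [PySem.Chars.rfind.go, hm]
  | succ j => simp only [PySem.Chars.rfind.go, hm]; simp

theorem pvGo_lt_of_not_match (t h : List Char) (b : Nat) (hm : h.isPrefixOf (t.drop b) = false) :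
    PySem.Chars.rfind.go t h b < (b : Int) := by
  cases b with
  | zero => simp at hm; simp [PySem.Chars.rfind.go, hm]
  | succ j =>
    simp only [PySem.Chars.rfind.go, hm]
    simp only [Bool.false_eq_true, if_false]
    calc PySem.Chars.rfind.go t h j ≤ (j : Int) := pvGo_le t h j
      _ < ((j + 1 : Nat) : Int) := by push_cast; omega

theorem pvGo_succ_of_not_match (t h : List Char) (j : Nat)
    (hm : h.isPrefixOf (t.drop (j + 1)) = false) :
    PySem.Chars.rfind.go t h (j + 1) = PySem.Chars.rfind.go t h j := by
  simp [PySem.Chars.rfind.go, hm]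

-- the fold does not move when every candidate value is ≤ the accumulated position
theorem pvFoldB_frozen (t : List Char) (b : Nat) (hs : List (String × String)) (st : Int × String)
    (h : ∀ hn ∈ hs, PySem.Chars.rfind.go t hn.1.toList b ≤ st.1) :
    pvFoldB t b hs st = st := by
  induction hs generalizing st with
  | nil => rfl
  | cons hn hs ih =>
    have h1 := h hn (by simp)
    simp only [pvFoldB, List.foldl_cons]
    rw [if_neg (by omega)]
    exact ih st (fun x hx => h x (by simp [hx]))

-- lowering the bound from b+1 to b changes nothing when no header matches at position b+1
theorem pvFoldB_succ_no_match (t : List Char) (j : Nat) (hs : List (String × String)) (st : Int × String)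
    (h : ∀ hn ∈ hs, hn.1.toList.isPrefixOf (t.drop (j + 1)) = false) :
    pvFoldB t (j + 1) hs st = pvFoldB t j hs st := by
  induction hs generalizing st with
  | nil => rfl
  | cons hn hs ih =>
    simp only [pvFoldB, List.foldl_cons]
    rw [pvGo_succ_of_not_match t hn.1.toList j (h hn (by simp))]
    exact ih _ (fun x hx => h x (by simp [hx]))

-- when some header matches at the bound b itself, the first such header wins the fold
theorem pvFoldB_match (t : List Char) (b : Nat) (hs : List (String × String)) (st : Int × String)
    (hn0 : String × String) (hst : st.1 < (b : Int))
    (hf : hs.find? (fun hn => hn.1.toList.isPrefixOf (t.drop b)) = some hn0) :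
    (pvFoldB t b hs st).2 = hn0.2 := by
  induction hs generalizing st with
  | nil => simp at hf
  | cons hn hs ih =>
    by_cases hc : hn.1.toList.isPrefixOf (t.drop b) = true
    · simp only [List.find?_cons, hc] at hf
      injection hf with hf; subst hf
      simp only [pvFoldB, List.foldl_cons]
      rw [pvGo_of_match t hn.1.toList b hc, if_pos hst]
      rw [show (List.foldl _ ((b : Int), hn.2) hs) = pvFoldB t b hs ((b : Int), hn.2) from rfl]
      rw [pvFoldB_frozen t b hs _ (fun x _ => pvGo_le t x.1.toList b)]
    · simp only [List.find?_cons, Bool.eq_false_iff.mpr hc] at hf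
      simp only [pvFoldB, List.foldl_cons]
      have hlt := pvGo_lt_of_not_match t hn.1.toList b (Bool.eq_false_iff.mpr hc)
      split
      · exact ih _ hlt hf
      · exact ih st hst hf

-- the backward scan down from position i equals A's fold with rfind truncated at bound i
theorem pvScan_eq_foldB (t : List Char) (hs : List (String × String)) (i : Nat) :
    pvScan t hs (i + 1) = (pvFoldB t i hs (-1, "UNKNOWN")).2 := by
  induction i with
  | zero =>
    simp only [pvScan]
    cases hf : hs.find? (fun hn => PySem.Chars.startswith (t.drop 0) hn.1.toList) with
    | some hn0 =>
      exact (pvFoldB_match t 0 hs (-1, "UNKNOWN") hn0 (by norm_num) hf).symm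
    | none =>
      have := List.find?_eq_none.mp hf
      rw [pvFoldB_frozen t 0 hs _ (fun x hx => by
        have hx' : x.1.toList.isPrefixOf (t.drop 0) = false :=
          Bool.eq_false_iff.mpr (by simpa [PySem.Chars.startswith] using this x hx)
        have := pvGo_lt_of_not_match t x.1.toList 0 hx'
        omega)]
  | succ j ih =>
    simp only [pvScan]
    cases hf : hs.find? (fun hn => PySem.Chars.startswith (t.drop (j + 1)) hn.1.toList) with
    | some hn0 =>
      exact (pvFoldB_match t (j + 1) hs (-1, "UNKNOWN") hn0 (by omega) hf).symm
    | none =>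
      have hnone := List.find?_eq_none.mp hf
      rw [pvFoldB_succ_no_match t j hs _ (fun x hx =>
        Bool.eq_false_iff.mpr (by simpa [PySem.Chars.startswith] using hnone x hx))]
      exact ih

theorem pvNot_prefix_nil (h : List Char) (hne : h ≠ []) : h.isPrefixOf ([] : List Char) = false := by
  cases h with
  | nil => exact absurd rfl hne
  | cons c cs => rfl

theorem pvSections_nonempty : ∀ hn ∈ pvSections, hn.1.toList ≠ [] := by decide

-- core equivalence on the shared uppercased prefix
theorem pvCore (t : List Char) :
    (pvFoldB t t.length pvSections (-1, "UNKNOWN")).2 = pvScan t pvSections t.length := by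
  cases hl : t.length with
  | zero =>
    have ht : t = [] := List.length_eq_zero_iff.mp hl
    subst ht
    rw [pvFoldB_frozen _ 0 _ _ (fun x hx => by
      have := pvGo_lt_of_not_match [] x.1.toList 0
        (by simpa using pvNot_prefix_nil x.1.toList (pvSections_nonempty x hx))
      omega)]
    rfl
  | succ j =>
    have hdrop : t.drop (j + 1) = [] := by
      apply List.drop_eq_nil_of_le; omega
    rw [pvFoldB_succ_no_match t j _ _ (fun x _ => by
      rw [hdrop]; exact pvNot_prefix_nil x.1.toList (pvSections_nonempty x (by assumption)))]
    exact (pvScan_eq_foldB t pvSections j).symm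

-- ===== VERDICT (by name: the statement is the Claim_ definition above) =====
theorem find_section_enhanced_py_spec : Claim_equal_find_section_enhanced_py := by
  intro content position _
  unfold Spec_find_section_enhanced_py find_section_enhanced_py find_section_enhanced_py_alt
  exact pvCore (PySem.Chars.upper (PySem.List.slice content.toList none (some position)))
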